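-- pv_equiv track=rewrite | github.com/Henok-Enyew/Leetcode-Solutions | 1589-maximum-sum-obtained-of-any-permutation/1589-maximum-sum-obtained-of-any-permutation.py | maxSumRangeQuery
-- ===== SOURCE A (Python) =====
-- from typing import List
--
-- def maxSumRangeQuery(nums: List[int], requests: List[List[int]]) -> int:
--     MOD = pow(10,9) + 7
--     sum = 0
--     l = len(nums)
--     counts = [0] * l
--     for start,end in requests:
--         ende = end + 1
--         counts[start] += 1
--         if ende < l:
--             counts[ende] -= 1
--     for i in range(1, l):
--         counts[i] += counts[i-1]
--     nums.sort()
--     counts.sort()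
--     for i in range(l):
--         sum += (nums[i]) * counts[i]
--     return sum % MOD
-- ===== SOURCE B (Python) =====
-- from typing import List
--
-- def maxSumRangeQuery(nums: List[int], requests: List[List[int]]) -> int:
--     MOD = 10 ** 9 + 7
--     counts = [0] * len(nums)
--     for start, end in requests:
--         for i in range(start, end + 1):
--             counts[i] += 1
--     nums.sort()
--     counts.sort()
--     total = sum(n * c for n, c in zip(nums, counts))
--     return total % MOD
-- ===== Notes on version B (the rewrite author's own statement) =====
-- stated objective: simpler
-- what changed: The difference-array + in-place prefix-sum construction of the per-index frequency table is replaced by a direct nested scan that increments counts[i] for every i in each [start,end] request, and the final indexed sum loop by a zip/sum over the two sorted lists.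
-- outside the precondition, e.g. on maxSumRangeQuery([1, 2], [[0, 3]]): A returns 3, B raises IndexError; on maxSumRangeQuery([1, 2], [[-1, 0]]): A returns 0, B returns 3; on maxSumRangeQuery([1, 2], [[1, -1]]): A returns 1000000006, B returns 0
import Mathlib
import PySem

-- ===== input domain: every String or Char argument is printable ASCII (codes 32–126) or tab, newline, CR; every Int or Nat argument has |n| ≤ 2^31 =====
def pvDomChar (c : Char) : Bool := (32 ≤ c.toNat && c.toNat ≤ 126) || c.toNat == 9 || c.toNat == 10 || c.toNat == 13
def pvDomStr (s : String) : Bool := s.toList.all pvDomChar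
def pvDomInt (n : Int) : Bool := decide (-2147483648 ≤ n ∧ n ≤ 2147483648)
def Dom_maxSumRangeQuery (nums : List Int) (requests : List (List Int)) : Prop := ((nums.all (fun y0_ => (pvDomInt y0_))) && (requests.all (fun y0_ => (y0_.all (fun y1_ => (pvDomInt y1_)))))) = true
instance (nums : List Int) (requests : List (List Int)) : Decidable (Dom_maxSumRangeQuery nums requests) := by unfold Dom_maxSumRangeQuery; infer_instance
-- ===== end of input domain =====

-- B replaces A's difference-array + prefix-sum construction of the per-index request
-- frequencies by a direct nested per-request scan, and the indexed product loop by zip/sum.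
-- Both A and B sort `nums` in place (same observable mutation); equivalence is about the return value.

-- ===== PORT A =====
-- one request of A's loop body: counts[start] += 1; if end+1 < l: counts[end+1] -= 1
def aStep (l : Nat) (c : List Int) (r : List Int) : List Int :=
  match r with
  | [start, e] =>
    let ende := e + 1
    let c1 := PySem.List.pySetD c start (PySem.List.pyGetD c start 0 + 1)
    if ende < (l : Int) then PySem.List.pySetD c1 ende (PySem.List.pyGetD c1 ende 0 - 1) else c1
  | _ => c  -- Python raises ValueError here (unpacking); outside Pre_

-- one step of A's prefix pass: counts[i] += counts[i-1]
def aPrefixStep (c : List Int) (i : Int) : List Int :=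
  PySem.List.pySetD c i (PySem.List.pyGetD c i 0 + PySem.List.pyGetD c (i - 1) 0)

def maxSumRangeQuery (nums : List Int) (requests : List (List Int)) : Int :=
  let MOD : Int := 10 ^ 9 + 7
  let l := nums.length
  let counts := requests.foldl (aStep l) (List.replicate l 0)
  let counts := (PySem.List.pyRange 1 (l : Int)).foldl aPrefixStep counts
  let nums := PySem.List.sorted nums (fun x => x)
  let counts := PySem.List.sorted counts (fun x => x)
  let s := (PySem.List.pyRange 0 (l : Int)).foldl
    (fun s i => s + PySem.List.pyGetD nums i 0 * PySem.List.pyGetD counts i 0) 0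
  PySem.Int.mod s MOD

-- ===== PORT B =====
-- counts[i] += 1
def bIncr (c : List Int) (i : Int) : List Int :=
  PySem.List.pySetD c i (PySem.List.pyGetD c i 0 + 1)

-- one request of B's loop: for i in range(start, end+1): counts[i] += 1
def bStep (c : List Int) (r : List Int) : List Int :=
  match r with
  | [start, e] => (PySem.List.pyRange start (e + 1)).foldl bIncr c
  | _ => c  -- Python raises ValueError here (unpacking); outside Pre_

def maxSumRangeQuery_alt (nums : List Int) (requests : List (List Int)) : Int :=
  let MOD : Int := 10 ^ 9 + 7
  let counts := requests.foldl bStep (List.replicate nums.length 0)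
  let nums := PySem.List.sorted nums (fun x => x)
  let counts := PySem.List.sorted counts (fun x => x)
  let total := (nums.zip counts).foldl (fun s p => s + p.1 * p.2) 0
  PySem.Int.mod total MOD

-- ===== PRECONDITION & SPEC =====
-- one well-formed range request: r = [s, e] with 0 ≤ s ≤ e < l
abbrev ReqOK (l : Nat) (r : List Int) : Prop :=
  r.length = 2 ∧ 0 ≤ r.getD 0 0 ∧ r.getD 0 0 ≤ r.getD 1 0 ∧ r.getD 1 0 < (l : Int)

-- Pre_ restricts requests to well-formed ranges [s,e] with 0 ≤ s ≤ e < len(nums): outside it A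
-- raises (ValueError / IndexError) or returns accidental values via Python negative-index
-- wraparound / silent clamping of end ≥ len(nums), where B's direct per-index scan raises
-- IndexError (end ≥ len(nums)) or yields a different accidental value.
def Pre_maxSumRangeQuery (nums : List Int) (requests : List (List Int)) : Prop :=
  ∀ r ∈ requests, ReqOK nums.length r

instance (nums : List Int) (requests : List (List Int)) : Decidable (Pre_maxSumRangeQuery nums requests) := by
  unfold Pre_maxSumRangeQuery; infer_instance

def pvWitness_maxSumRangeQuery : List Int × List (List Int) := ([1, 2], [[0, 1]])

def Spec_maxSumRangeQuery (nums : List Int) (requests : List (List Int)) (out : Int) : Prop := out = maxSumRangeQuery_alt nums requests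
instance (nums : List Int) (requests : List (List Int)) (out : Int) : Decidable (Spec_maxSumRangeQuery nums requests out) := by unfold Spec_maxSumRangeQuery; infer_instance

-- ===== CLAIM (what is proved, stated in full; the proofs are below) =====
def Claim_equal_maxSumRangeQuery : Prop := ∀ (nums : List Int) (requests : List (List Int)), Dom_maxSumRangeQuery nums requests → Pre_maxSumRangeQuery nums requests → Spec_maxSumRangeQuery nums requests (maxSumRangeQuery nums requests)

-- ===== LEMMAS AND PROOFS =====

lemma getD_set_eq (c : List Int) (j i : Nat) (v : Int) (hj : j < c.length) :
    (c.set j v).getD i 0 = if i = j then v else c.getD i 0 := by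
  rw [List.getD_eq_getElem?_getD, List.getD_eq_getElem?_getD, List.getElem?_set]
  by_cases h1 : j = i
  · subst h1; simp [hj]
  · simp [h1, Ne.symm h1]
lemma pySetD_getD (c : List Int) (j : Int) (v : Int) (h0 : 0 ≤ j) (hj : j < (c.length : Int)) (i : Nat) :
    (PySem.List.pySetD c j v).getD i 0 = if (i : Int) = j then v else c.getD i 0 := by
  rw [PySem.List.pySetD_of_nonneg _ _ h0, getD_set_eq _ _ _ _ (by omega)]
  split_ifs with h1 h2 h3 <;> first | rfl | omega
lemma pyGetD_getD (c : List Int) (j : Int) (h0 : 0 ≤ j) (hj : j < (c.length : Int)) :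
    PySem.List.pyGetD c j 0 = c.getD j.toNat 0 := by
  rw [PySem.List.pyGetD_eq_getElem c 0 h0 hj, List.getD_eq_getElem _ _ (by omega)]
lemma length_aStep (l : Nat) (c : List Int) (r : List Int) : (aStep l c r).length = c.length := by
  unfold aStep
  dsimp only
  rcases r with _ | ⟨s, _ | ⟨e, _ | _⟩⟩ <;> simp [PySem.List.length_pySetD] <;> split_ifs <;>
    simp [PySem.List.length_pySetD]

lemma aStep_getD (l : Nat) (c : List Int) (r : List Int) (hOK : ReqOK l r)
    (hc : c.length = l) (i : Nat) (hi : i < l) :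
    (aStep l c r).getD i 0 = c.getD i 0 +
      ((if r.getD 0 0 = (i : Int) then (1 : Int) else 0) +
       (if r.getD 1 0 + 1 < (l : Int) ∧ r.getD 1 0 + 1 = (i : Int) then (-1 : Int) else 0)) := by
  obtain ⟨hlen, h0, h1, h2⟩ := hOK
  rcases r with _ | ⟨s, _ | ⟨e, _ | ⟨x, t⟩⟩⟩ <;> simp at hlen
  have hr0 : ([s, e] : List Int).getD 0 0 = s := rfl
  have hr1 : ([s, e] : List Int).getD 1 0 = e := rfl
  rw [hr0] at h0 h1
  rw [hr1] at h1 h2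
  rw [hr0, hr1]
  unfold aStep
  dsimp only
  have hsl : s < (c.length : Int) := by omega
  by_cases he : e + 1 < (l : Int)
  · have he1 : (0:Int) ≤ e + 1 := by omega
    rw [if_pos he, pyGetD_getD c s h0 hsl]
    generalize hv : c.getD s.toNat 0 + 1 = v
    have hb : e + 1 < ((PySem.List.pySetD c s v).length : Int) := by
      rw [PySem.List.length_pySetD]; omega
    rw [pySetD_getD _ _ _ he1 hb i, pyGetD_getD _ _ he1 hb,
        pySetD_getD c s v h0 hsl ((e + 1).toNat), pySetD_getD c s v h0 hsl i,
        if_neg (show ¬(((e + 1).toNat : Nat) : Int) = s by omega)]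
    split_ifs <;>
      first
        | omega
        | (have hii : (e + 1).toNat = i := (by omega); rw [hii]; ring)
        | (have hii : s.toNat = i := (by omega); rw [← hv, hii]; ring)
  · rw [if_neg he, pyGetD_getD c s h0 hsl]
    rw [pySetD_getD c s _ h0 hsl i]
    split_ifs <;>
      first
        | omega
        | (have hii : s.toNat = i := (by omega); rw [hii]; ring)
        | ring1
lemma foldA_length (l : Nat) (rs : List (List Int)) : ∀ c : List Int,
    (rs.foldl (aStep l) c).length = c.length := by
  induction rs with
  | nil => intro c; rfl
  | cons r rs ih => intro c; rw [List.foldl_cons, ih, length_aStep]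

lemma foldA_getD (l : Nat) (rs : List (List Int)) :
    ∀ c : List Int, c.length = l → (∀ r ∈ rs, ReqOK l r) → ∀ i : Nat, i < l →
    (rs.foldl (aStep l) c).getD i 0 = c.getD i 0 +
      (rs.map (fun r => (if r.getD 0 0 = (i : Int) then (1 : Int) else 0) +
        (if r.getD 1 0 + 1 < (l : Int) ∧ r.getD 1 0 + 1 = (i : Int) then (-1 : Int) else 0))).sum := by
  induction rs with
  | nil => intro c _ _ i _; simp
  | cons r rs ih =>
    intro c hc hOK i hi
    rw [List.foldl_cons, ih (aStep l c r) (by rw [length_aStep]; exact hc)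
      (fun r hr => hOK r (List.mem_cons_of_mem _ hr)) i hi,
      aStep_getD l c r (hOK r List.mem_cons_self) hc i hi]
    simp [List.map_cons, List.sum_cons]
    ring

lemma prefix_getD (c : List Int) : ∀ k : Nat, k ≤ c.length →
    ((PySem.List.pyRange 1 (k : Int)).foldl aPrefixStep c).length = c.length ∧
    ∀ i : Nat, i < c.length →
      ((PySem.List.pyRange 1 (k : Int)).foldl aPrefixStep c).getD i 0 =
        if i < k then ((List.range (i + 1)).map (fun j : Nat => c.getD j 0)).sum else c.getD i 0 := by
  intro k
  induction k with
  | zero =>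
    intro _
    rw [PySem.List.pyRange_one_eq_nil (by norm_num)]
    exact ⟨rfl, by intro i _; simp⟩
  | succ k ih =>
    intro hk1
    by_cases hk : k = 0
    · subst hk
      rw [show ((1:Nat):Int) = 1 by norm_num, PySem.List.pyRange_one_eq_nil (by norm_num)]
      refine ⟨rfl, ?_⟩
      intro i _
      rcases Nat.eq_zero_or_pos i with h | h
      · subst h; simp
      · rw [if_neg (by omega)]; rfl
    · obtain ⟨ihlen, ihval⟩ := ih (by omega)
      have h1k : (1:Int) ≤ (k : Int) := by omega
      rw [show ((k + 1 : Nat) : Int) = (k : Int) + 1 by push_cast; ring,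
          PySem.List.pyRange_one_succ_right h1k, List.foldl_append]
      set cp := (PySem.List.pyRange 1 (k : Int)).foldl aPrefixStep c with hcp
      have hkc : (k : Int) < (cp.length : Int) := by rw [ihlen]; omega
      have hk0 : (0:Int) ≤ (k : Int) := by omega
      have hk1' : (0:Int) ≤ (k : Int) - 1 := by omega
      have hkc1 : (k : Int) - 1 < (cp.length : Int) := by omega
      simp only [List.foldl_cons, List.foldl_nil]
      unfold aPrefixStep
      constructor
      · rw [PySem.List.length_pySetD, ihlen]
      · intro i hi
        rw [pySetD_getD cp _ _ hk0 hkc i, pyGetD_getD cp _ hk0 hkc, pyGetD_getD cp _ hk1' hkc1]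
        have ht1 : ((k : Int)).toNat = k := by omega
        have ht2 : ((k : Int) - 1).toNat = k - 1 := by omega
        rw [ht1, ht2]
        by_cases hik : (i : Int) = (k : Int)
        · rw [if_pos hik]
          have hik' : i = k := by omega
          subst hik'
          rw [ihval i (by omega), ihval (i - 1) (by omega), if_neg (by omega), if_pos (by omega),
              if_pos (by omega)]
          rw [show i - 1 + 1 = i by omega, List.range_succ, List.map_append, List.sum_append]
          simp [List.map_cons, List.sum_cons]
          ring
        · rw [if_neg hik, ihval i hi]
          split_ifs <;> first | rfl | omega

lemma bInner_getD (n : Nat) : ∀ s e : Int, ∀ c : List Int, (e + 1 - s).toNat = n →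
    0 ≤ s → e < (c.length : Int) →
    ((PySem.List.pyRange s (e + 1)).foldl bIncr c).length = c.length ∧
    ∀ i : Nat, i < c.length →
      ((PySem.List.pyRange s (e + 1)).foldl bIncr c).getD i 0 =
        c.getD i 0 + (if s ≤ (i : Int) ∧ (i : Int) ≤ e then (1 : Int) else 0) := by
  induction n with
  | zero =>
    intro s e c hn _ _
    rw [PySem.List.pyRange_one_eq_nil (by omega)]
    refine ⟨rfl, ?_⟩
    intro i _
    rw [if_neg (by omega)]
    simp
  | succ n ih =>
    intro s e c hn hs he
    rw [PySem.List.pyRange_one_cons (by omega), List.foldl_cons]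
    have hsc : s < (c.length : Int) := by omega
    have hlen1 : (bIncr c s).length = c.length := PySem.List.length_pySetD ..
    obtain ⟨ihlen, ihval⟩ := ih (s + 1) e (bIncr c s) (by omega) (by omega) (by rw [hlen1]; exact he)
    rw [hlen1] at ihlen ihval
    refine ⟨ihlen, ?_⟩
    intro i hi
    rw [ihval i hi]
    unfold bIncr
    rw [pySetD_getD c s _ hs hsc i, pyGetD_getD c s hs hsc]
    by_cases his : (i : Int) = s
    · rw [if_pos his]
      have : s.toNat = i := by omega
      rw [this, if_neg (show ¬(s + 1 ≤ (i:Int) ∧ (i:Int) ≤ e) by omega), if_pos (show s ≤ (i:Int) ∧ (i:Int) ≤ e by omega)]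
      ring
    · rw [if_neg his]
      split_ifs <;> first | ring1 | (exfalso; omega)

lemma bStep_spec (l : Nat) (c : List Int) (r : List Int) (hOK : ReqOK l r) (hc : c.length = l) :
    (bStep c r).length = c.length ∧
    ∀ i : Nat, i < c.length →
      (bStep c r).getD i 0 = c.getD i 0 +
        (if r.getD 0 0 ≤ (i : Int) ∧ (i : Int) ≤ r.getD 1 0 then (1 : Int) else 0) := by
  obtain ⟨hlen, h0, h1, h2⟩ := hOK
  rcases r with _ | ⟨s, _ | ⟨e, _ | ⟨x, t⟩⟩⟩ <;> simp at hlen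
  have hr0 : ([s, e] : List Int).getD 0 0 = s := rfl
  have hr1 : ([s, e] : List Int).getD 1 0 = e := rfl
  rw [hr0] at h0 h1
  rw [hr1] at h1 h2
  unfold bStep
  dsimp only
  rw [hr0, hr1]
  exact bInner_getD (e + 1 - s).toNat s e c rfl h0 (by omega)

lemma foldB_spec (l : Nat) (rs : List (List Int)) :
    ∀ c : List Int, c.length = l → (∀ r ∈ rs, ReqOK l r) →
    (rs.foldl bStep c).length = c.length ∧
    ∀ i : Nat, i < l →
    (rs.foldl bStep c).getD i 0 = c.getD i 0 +
      (rs.map (fun r => if r.getD 0 0 ≤ (i : Int) ∧ (i : Int) ≤ r.getD 1 0 then (1 : Int) else 0)).sum := by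
  induction rs with
  | nil => intro c _ _; exact ⟨rfl, by intro i _; simp⟩
  | cons r rs ih =>
    intro c hc hOK
    obtain ⟨hsl, hsv⟩ := bStep_spec l c r (hOK r List.mem_cons_self) hc
    obtain ⟨ihl, ihv⟩ := ih (bStep c r) (by rw [hsl]; exact hc)
      (fun r hr => hOK r (List.mem_cons_of_mem _ hr))
    rw [List.foldl_cons]
    refine ⟨by rw [ihl, hsl], ?_⟩
    intro i hi
    rw [ihv i hi, hsv i (by omega)]
    simp [List.map_cons, List.sum_cons]
    ring
lemma sum_ite_range (a : Int) (ha : 0 ≤ a) : ∀ n : Nat,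
    ((List.range n).map (fun j : Nat => if a = (j : Int) then (1 : Int) else 0)).sum =
      if a < (n : Int) then 1 else 0 := by
  intro n
  induction n with
  | zero => simp; omega
  | succ n ih =>
    rw [List.range_succ, List.map_append, List.sum_append, ih]
    simp only [List.map_cons, List.map_nil, List.sum_cons, List.sum_nil]
    split_ifs <;> (try omega) <;> simp <;> omega

lemma sum_swap (rs : List (List Int)) (n : Nat) (g : Nat → List Int → Int) :
    ((List.range n).map (fun j : Nat => (rs.map (g j)).sum)).sum =
      (rs.map (fun r => ((List.range n).map (fun j : Nat => g j r)).sum)).sum := by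
  induction rs with
  | nil => simp
  | cons r rs ih =>
    simp only [List.map_cons, List.sum_cons, ← ih]
    rw [← PySem.List.sum_map_add_int]

lemma sum_ite_range_neg (a : Int) (ha : 0 ≤ a) : ∀ n : Nat,
    ((List.range n).map (fun j : Nat => if a = (j : Int) then (-1 : Int) else 0)).sum =
      if a < (n : Int) then -1 else 0 := by
  intro n
  induction n with
  | zero => simp; omega
  | succ n ih =>
    rw [List.range_succ, List.map_append, List.sum_append, ih]
    simp only [List.map_cons, List.map_nil, List.sum_cons, List.sum_nil]
    split_ifs <;> (try omega) <;> simp <;> omega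

lemma delta_psum (l : Nat) (r : List Int) (hOK : ReqOK l r) (i : Nat) (hi : i < l) :
    ((List.range (i + 1)).map (fun j : Nat => (if r.getD 0 0 = (j : Int) then (1 : Int) else 0) +
        (if r.getD 1 0 + 1 < (l : Int) ∧ r.getD 1 0 + 1 = (j : Int) then (-1 : Int) else 0))).sum =
      if r.getD 0 0 ≤ (i : Int) ∧ (i : Int) ≤ r.getD 1 0 then (1 : Int) else 0 := by
  obtain ⟨hlen, h0, h1, h2⟩ := hOK
  rw [PySem.List.sum_map_add_int, sum_ite_range _ h0]
  by_cases he : r.getD 1 0 + 1 < (l : Int)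
  · simp only [he, true_and]
    rw [sum_ite_range_neg _ (by omega)]
    split_ifs <;> omega
  · have hz : ((List.range (i + 1)).map (fun j : Nat =>
        if r.getD 1 0 + 1 < (l : Int) ∧ r.getD 1 0 + 1 = (j : Int) then (-1 : Int) else 0)).sum
        = 0 := by
      rw [List.sum_eq_zero]
      intro x hx
      simp only [List.mem_map] at hx
      obtain ⟨j, _, hj⟩ := hx
      rw [if_neg (by tauto)] at hj
      omega
    rw [hz]
    split_ifs <;> omega
lemma counts_eq (l : Nat) (rs : List (List Int)) (hOK : ∀ r ∈ rs, ReqOK l r) :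
    (PySem.List.pyRange 1 (l : Int)).foldl aPrefixStep
        (rs.foldl (aStep l) (List.replicate l 0)) =
      rs.foldl bStep (List.replicate l 0) := by
  set d := rs.foldl (aStep l) (List.replicate l 0) with hd
  have hdlen : d.length = l := by rw [hd, foldA_length]; simp
  obtain ⟨plen, pval⟩ := prefix_getD d l (by omega)
  obtain ⟨blen, bval⟩ := foldB_spec l rs (List.replicate l 0) (by simp) hOK
  apply List.ext_getElem
  · rw [plen, hdlen, blen]; simp
  intro i h1 h2
  have hil : i < l := by rw [plen, hdlen] at h1; exact h1
  rw [← List.getD_eq_getElem _ 0 h1, ← List.getD_eq_getElem _ 0 h2,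
      pval i (by omega), bval i hil, if_pos hil]
  have hstep : ∀ j ∈ List.range (i + 1), d.getD j 0 =
      (rs.map (fun r => (if r.getD 0 0 = (j : Int) then (1 : Int) else 0) +
        (if r.getD 1 0 + 1 < (l : Int) ∧ r.getD 1 0 + 1 = (j : Int) then (-1 : Int) else 0))).sum := by
    intro j hj
    rw [List.mem_range] at hj
    rw [hd, foldA_getD l rs (List.replicate l 0) (by simp) hOK j (by omega)]
    simp
  rw [List.map_congr_left hstep,
      sum_swap rs (i + 1) (fun j r => (if r.getD 0 0 = (j : Int) then (1 : Int) else 0) +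
        (if r.getD 1 0 + 1 < (l : Int) ∧ r.getD 1 0 + 1 = (j : Int) then (-1 : Int) else 0)),
      List.map_congr_left (fun r hr => delta_psum l r (hOK r hr) i hil)]
  simp
lemma pyGetD_zip (xs ys : List Int) (i : Int) (h0 : 0 ≤ i) (hx : i < (xs.length : Int))
    (hy : i < (ys.length : Int)) :
    PySem.List.pyGetD (xs.zip ys) i (0, 0) =
      (PySem.List.pyGetD xs i 0, PySem.List.pyGetD ys i 0) := by
  have hz : i < ((xs.zip ys).length : Int) := by rw [List.length_zip]; omega
  rw [PySem.List.pyGetD_eq_getElem _ _ h0 hz, PySem.List.pyGetD_eq_getElem _ _ h0 hx,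
      PySem.List.pyGetD_eq_getElem _ _ h0 hy, List.getElem_zip]

lemma sum_zip_eq (xs ys : List Int) (h : ys.length = xs.length) (a : Int) :
    (PySem.List.pyRange 0 (xs.length : Int)).foldl
        (fun s i => s + PySem.List.pyGetD xs i 0 * PySem.List.pyGetD ys i 0) a =
      (xs.zip ys).foldl (fun s p => s + p.1 * p.2) a := by
  have hz : (xs.zip ys).length = xs.length := by rw [List.length_zip, h, min_self]
  have hmain := PySem.List.foldl_pyRange_zero_pyGetD' (xs := xs.zip ys) (d := ((0 : Int), (0 : Int)))
    (f := fun (s : Int) (p : Int × Int) => s + p.1 * p.2) (init := a)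
  rw [hz] at hmain
  rw [← hmain]
  apply PySem.List.foldl_congr_mem
  intro acc x hx
  rw [PySem.List.mem_pyRange_one] at hx
  rw [pyGetD_zip xs ys x hx.1 hx.2 (by omega)]

-- ===== VERDICT (by name: the statement is the Claim_ definition above) =====
theorem maxSumRangeQuery_spec : Claim_equal_maxSumRangeQuery := by
  intro nums requests _hdom hpre
  unfold Spec_maxSumRangeQuery maxSumRangeQuery maxSumRangeQuery_alt
  dsimp only
  have hOK : ∀ r ∈ requests, ReqOK nums.length r := hpre
  rw [counts_eq nums.length requests hOK]
  have hsn : (PySem.List.sorted nums (fun x => x)).length = nums.length :=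
    (PySem.List.sorted_perm nums (fun x => x) false).length_eq
  have hbl : (requests.foldl bStep (List.replicate nums.length 0)).length = nums.length := by
    rw [(foldB_spec nums.length requests (List.replicate nums.length 0) (by simp) hOK).1]
    simp
  have hsc : (PySem.List.sorted (requests.foldl bStep (List.replicate nums.length 0))
      (fun x => x)).length = nums.length := by
    rw [(PySem.List.sorted_perm _ (fun x => x) false).length_eq, hbl]
  congr 1
  rw [show ((nums.length : Nat) : Int) = (((PySem.List.sorted nums (fun x => x)).length : Nat) : Int) by rw [hsn],
      sum_zip_eq _ _ (by rw [hsc, hsn])]
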